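-- pv_equiv track=rewrite | github.com/hieudoanm/lodash | packages/py/lodash/object.py | omit
-- ===== SOURCE A (Python) =====
-- def keys(obj):
--   return list(obj.keys())
--
-- def omit(obj, paths):
--   newObject = {}
--   _keys = keys(obj)
--   for key in _keys:
--     if key not in paths:
--       value = obj[key]
--       newObject[key] = value
--   return newObject
-- ===== SOURCE B (Python) =====
-- def omit(obj, paths):
--   result = dict(obj)
--   for key in paths:
--     result.pop(key, None)
--   return result
-- ===== Notes on version B (the rewrite author's own statement) =====
-- stated objective: faster
-- what changed: B builds the result by subtraction: it copies the dict once and pops each path key (O(1) dict removal), instead of iterating the dict's keys and testing each against the paths list (a linear scan per key) while inserting kept entries into a growing accumulator.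
import Mathlib
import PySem

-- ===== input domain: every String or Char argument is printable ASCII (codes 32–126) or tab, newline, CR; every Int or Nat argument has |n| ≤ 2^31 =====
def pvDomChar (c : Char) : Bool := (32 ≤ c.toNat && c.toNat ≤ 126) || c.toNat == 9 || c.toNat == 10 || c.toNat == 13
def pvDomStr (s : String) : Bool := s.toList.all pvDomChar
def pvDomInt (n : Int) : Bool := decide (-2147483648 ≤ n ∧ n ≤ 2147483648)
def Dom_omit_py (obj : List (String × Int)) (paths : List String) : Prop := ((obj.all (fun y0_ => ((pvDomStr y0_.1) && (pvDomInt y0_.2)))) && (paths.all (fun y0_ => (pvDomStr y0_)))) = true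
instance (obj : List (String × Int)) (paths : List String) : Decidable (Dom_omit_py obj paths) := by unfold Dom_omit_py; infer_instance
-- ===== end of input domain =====

-- B builds the omitted dict by subtraction (copy then pop each path) instead of A's
-- key-by-key accumulation; equivalence is proved on association lists with distinct keys.


-- ===== PORT A =====
-- helper keys(obj) = list(obj.keys())
def keys_py (obj : PySem.Dict String Int) : List String := PySem.Dict.keys obj

def omit_py (obj : List (String × Int)) (paths : List String) : List (String × Int) :=
  -- newObject = {}; for key in keys(obj): if key not in paths: newObject[key] = obj[key]
  let d : PySem.Dict String Int := ⟨obj⟩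
  let _keys := keys_py d
  (_keys.foldl
    (fun (newObject : PySem.Dict String Int) key =>
      if !(paths.contains key) then
        newObject.insert key ((PySem.Dict.get? d key).getD 0)  -- obj[key]; key is always present
      else newObject)
    ⟨[]⟩).items

-- ===== PORT B =====
def omit_py_alt (obj : List (String × Int)) (paths : List String) : List (String × Int) :=
  -- result = dict(obj); for key in paths: result.pop(key, None); return result
  (paths.foldl (fun (result : PySem.Dict String Int) key => result.erase key) ⟨obj⟩).items

-- ===== PRECONDITION & SPEC =====
-- Pre_ excludes association lists with duplicate keys: those do not represent any Python
-- dict (dict construction collapses them), so neither behaviour there is specified.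
def Pre_omit_py (obj : List (String × Int)) (_paths : List String) : Prop :=
  (obj.map Prod.fst).Nodup
instance (obj : List (String × Int)) (paths : List String) : Decidable (Pre_omit_py obj paths) := by unfold Pre_omit_py; infer_instance

def pvWitness_omit_py : (List (String × Int)) × List String := ([("a", 1), ("b", 2)], ["b"])

def Spec_omit_py (obj : List (String × Int)) (paths : List String) (out : List (String × Int)) : Prop := out = omit_py_alt obj paths
instance (obj : List (String × Int)) (paths : List String) (out : List (String × Int)) : Decidable (Spec_omit_py obj paths out) := by unfold Spec_omit_py; infer_instance

-- ===== CLAIM (what is proved, stated in full; the proofs are below) =====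
def Claim_equal_omit_py : Prop := ∀ (obj : List (String × Int)) (paths : List String), Dom_omit_py obj paths → Pre_omit_py obj paths → Spec_omit_py obj paths (omit_py obj paths)

-- ===== LEMMAS AND PROOFS =====

-- B's loop of erases is one filter over the copied items.
theorem alt_items (paths : List String) : ∀ (start : List (String × Int)),
    (paths.foldl (fun (result : PySem.Dict String Int) key => result.erase key) ⟨start⟩).items
      = start.filter (fun p => !(paths.contains p.1)) := by
  induction paths with
  | nil => intro start; simp
  | cons k ks ih =>
      intro start
      have he : (⟨start⟩ : PySem.Dict String Int).erase k
          = ⟨start.filter (fun p => !(p.1 == k))⟩ := rfl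
      rw [List.foldl_cons, he, ih, List.filter_filter]
      congr 1
      funext p
      by_cases h1 : p.1 = k <;> by_cases h2 : p.1 ∈ ks <;> simp [h1, h2]

-- A's accumulation loop, with distinct keys and fresh accumulator, appends exactly the kept pairs.
theorem a_loop (paths : List String) (full : PySem.Dict String Int) :
    ∀ (rest : List (String × Int)) (acc : PySem.Dict String Int),
    (∀ p ∈ rest, PySem.Dict.get? full p.1 = some p.2) →
    (∀ p ∈ rest, acc.contains p.1 = false) →
    (rest.map Prod.fst).Nodup →
    ((rest.map Prod.fst).foldl
      (fun (newObject : PySem.Dict String Int) key =>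
        if !(paths.contains key) then
          newObject.insert key ((PySem.Dict.get? full key).getD 0)
        else newObject)
      acc).items
      = acc.items ++ rest.filter (fun p => !(paths.contains p.1)) := by
  intro rest
  induction rest with
  | nil => intro acc _ _ _; simp
  | cons p ps ih =>
      intro acc hget hacc hnd
      simp only [List.map_cons, List.foldl_cons, List.filter_cons]
      rw [List.map_cons, List.nodup_cons] at hnd
      have hnd' : (ps.map Prod.fst).Nodup := hnd.2
      have hnotin : p.1 ∉ ps.map Prod.fst := hnd.1
      by_cases hp : paths.contains p.1
      · simp only [hp, Bool.not_true, Bool.false_eq_true, if_false]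
        rw [ih acc (fun q hq => hget q (List.mem_cons_of_mem _ hq))
              (fun q hq => hacc q (List.mem_cons_of_mem _ hq)) hnd']
      · have hfresh : acc.contains p.1 = false := hacc p (List.mem_cons_self ..)
        have hins : (acc.insert p.1 ((PySem.Dict.get? full p.1).getD 0)).items
            = acc.items ++ [(p.1, p.2)] := by
          rw [hget p (List.mem_cons_self ..)]
          simp [PySem.Dict.insert, hfresh]
        simp only [Bool.not_eq_true] at hp
        simp only [hp, Bool.not_false, if_true]
        rw [ih _ (fun q hq => hget q (List.mem_cons_of_mem _ hq))
              (fun q hq => by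
                rw [PySem.Dict.contains_insert]
                have hne : q.1 ≠ p.1 := by
                  intro h
                  exact hnotin (h ▸ List.mem_map_of_mem hq)
                simp [hacc q (List.mem_cons_of_mem _ hq), hne]) hnd']
        simp [hins]

-- ===== VERDICT (by name: the statement is the Claim_ definition above) =====
theorem omit_py_spec : Claim_equal_omit_py := by
  intro obj paths _ hpre
  unfold Spec_omit_py omit_py omit_py_alt keys_py
  have hget : ∀ p ∈ obj, PySem.Dict.get? (⟨obj⟩ : PySem.Dict String Int) p.1 = some p.2 := by
    intro p hp
    exact PySem.Dict.get?_of_mem_items (d := ⟨obj⟩) (by simpa using hp) (by simpa [PySem.Dict.keys] using hpre)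
  have := a_loop paths ⟨obj⟩ obj ⟨[]⟩ hget
    (fun p _ => by simp [PySem.Dict.contains]) hpre
  simpa [PySem.Dict.keys, alt_items] using this
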